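-- pv_equiv track=rewrite | github.com/MrBrantCode/unitest_baseline | mut_generate/mist_train_taco/taco_3151/solution.py | count_red_triplets
-- ===== SOURCE A (Python) =====
-- def count_red_triplets(n, edges):
--     p = list(range(n))
--     rank = [0] * n
--     size = [1] * n
--
--     def get(v):
--         stack = []
--         while p[v] != v:
--             stack.append(v)
--             v = p[v]
--         for u in stack:
--             p[u] = v
--         return v
--
--     def union(v1, v2):
--         v1 = get(v1)
--         v2 = get(v2)
--         if v1 == v2:
--             return
--         if rank[v1] < rank[v2]:
--             (v1, v2) = (v2, v1)
--         size[v1] += size[v2]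
--         p[v2] = v1
--         rank[v1] += 1
--
--     for (x, y, col) in edges:
--         if col == 'b':
--             union(int(x) - 1, int(y) - 1)
--
--     a = [size[i] for i in range(n) if p[i] == i]
--     MOD = 10 ** 9 + 7
--
--     def solve(a):
--         s1 = [0]
--         for x in a:
--             s1.append((s1[-1] + x) % MOD)
--         s2 = [0]
--         for (i, x) in enumerate(a):
--             s2.append((s2[-1] + x * s1[i]) % MOD)
--         s3 = [0]
--         for (i, x) in enumerate(a):
--             s3.append((s3[-1] + x * s2[i]) % MOD)
--         return s3[-1]
--
--     return solve(a)
-- ===== SOURCE B (Python) =====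
-- def count_red_triplets(n, edges):
--     parent = list(range(n))
--     rank = [0] * n
--     size = [1] * n
--
--     # recursive path-compressing find (depth is O(log n) under union by rank)
--     def find(v):
--         if parent[v] != v:
--             parent[v] = find(parent[v])
--         return parent[v]
--
--     for (x, y, col) in edges:
--         if col == 'b':
--             a = find(int(x) - 1)
--             b = find(int(y) - 1)
--             if a != b:
--                 if rank[a] < rank[b]:
--                     (a, b) = (b, a)
--                 size[a] += size[b]
--                 parent[b] = a
--                 rank[a] += 1
--
--     MOD = 10 ** 9 + 7
--     # one pass of modular power sums over the component sizes, then
--     # Newton's identity e3 = (p1^3 - 3*p1*p2 + 2*p3) / 6 via the inverse of 6 mod MOD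
--     p1 = p2 = p3 = 0
--     for i in range(n):
--         if parent[i] == i:
--             s = size[i]
--             p1 = (p1 + s) % MOD
--             p2 = (p2 + s * s) % MOD
--             p3 = (p3 + s * s * s) % MOD
--     inv6 = 166666668  # pow(6, MOD - 2, MOD)
--     return (p1 * p1 % MOD * p1 - 3 * p1 * p2 + 2 * p3) % MOD * inv6 % MOD
-- ===== Notes on version B (the rewrite author's own statement) =====
-- stated objective: faster
-- what changed: B replaces A's iterative stack-based find by a recursive path-compressing find with the union inlined into the edge loop, skips building the intermediate component-size list, and replaces A's three cascaded prefix-sum loops by a single pass of modular power sums p1,p2,p3 consumed by Newton's closed form e3 = (p1^3 - 3*p1*p2 + 2*p3) * inv6 mod p.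
import Mathlib
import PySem

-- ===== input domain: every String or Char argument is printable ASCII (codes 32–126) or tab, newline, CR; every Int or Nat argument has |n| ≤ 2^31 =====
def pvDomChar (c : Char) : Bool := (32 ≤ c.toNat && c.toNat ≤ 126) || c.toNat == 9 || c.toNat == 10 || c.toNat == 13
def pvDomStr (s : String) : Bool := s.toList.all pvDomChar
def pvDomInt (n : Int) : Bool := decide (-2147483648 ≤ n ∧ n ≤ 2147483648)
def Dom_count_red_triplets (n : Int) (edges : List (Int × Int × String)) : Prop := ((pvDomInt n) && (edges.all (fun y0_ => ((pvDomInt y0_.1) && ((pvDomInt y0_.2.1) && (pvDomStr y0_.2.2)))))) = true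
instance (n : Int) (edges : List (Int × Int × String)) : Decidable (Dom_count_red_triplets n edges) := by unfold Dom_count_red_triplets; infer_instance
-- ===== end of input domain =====

-- B replaces A's iterative stack-based find by a recursive path-compressing find with the union
-- inlined into the edge loop, and replaces A's intermediate size list plus three cascaded
-- prefix-sum loops by one index pass of modular power sums fed into Newton's closed form
-- e3 = (p1^3 - 3*p1*p2 + 2*p3) * inv6 mod p.

-- ===== PORT A =====
-- Python-list indexing on an Array (O(1), as CPython's list): same value rule as PySem.List.pyGetD with default 0
def pvAGetD (arr : Array Int) (i : Int) : Int :=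
  if 0 ≤ i then (if i < (arr.size : Int) then arr.getD i.toNat 0 else 0)
  else if -(arr.size : Int) ≤ i then arr.getD (arr.size - (-i).toNat) 0 else 0

-- the Python 'while p[v] != v' chase of A's get; fuel p.length+2 covers every forest path (totality only, not a guard Python has)
def pvChase (p_ : List Int) (v : Int) (stack : List Int) : Nat → List Int × Int
  | 0 => (stack, v)
  | fuel + 1 =>
    if PySem.List.pyGetD p_ v 0 ≠ v then
      pvChase p_ (PySem.List.pyGetD p_ v 0) (stack ++ [v]) fuel
    else (stack, v)

def pvGet (p_ : List Int) (v : Int) : List Int × Int :=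
  let sr := pvChase p_ v [] (p_.length + 2)
  (sr.1.foldl (fun q u => PySem.List.pySetD q u sr.2) p_, sr.2)

def pvUnion (st : List Int × List Int × List Int) (w1 w2 : Int) : List Int × List Int × List Int :=
  let g1 := pvGet st.1 w1
  let g2 := pvGet g1.1 w2
  let v1 := g1.2
  let v2 := g2.2
  let rank_ := st.2.1
  let size_ := st.2.2
  if v1 = v2 then (g2.1, rank_, size_)
  else
    let vv := if PySem.List.pyGetD rank_ v1 0 < PySem.List.pyGetD rank_ v2 0 then (v2, v1) else (v1, v2)
    (PySem.List.pySetD g2.1 vv.2 vv.1,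
     PySem.List.pySetD rank_ vv.1 (PySem.List.pyGetD rank_ vv.1 0 + 1),
     PySem.List.pySetD size_ vv.1 (PySem.List.pyGetD size_ vv.1 0 + PySem.List.pyGetD size_ vv.2 0))

def pvCompSizes (n : Int) (edges : List (Int × Int × String)) : List Int :=
  let init : List Int × List Int × List Int :=
    (PySem.List.pyRange 0 n 1, List.replicate n.toNat 0, List.replicate n.toNat 1)
  let st := edges.foldl (fun st e => if e.2.2 = "b" then pvUnion st (e.1 - 1) (e.2.1 - 1) else st) init
  ((st.1.zip st.2.2).foldl
      (fun (ai : Array Int × Int) pv => (if pv.1 == ai.2 then ai.1.push pv.2 else ai.1, ai.2 + 1))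
      (#[], (0 : Int))).1.toList

def count_red_triplets (n : Int) (edges : List (Int × Int × String)) : Int :=
  let a := pvCompSizes n edges
  let s1 := a.foldl (fun s x => s.push (PySem.Int.mod (pvAGetD s (-1) + x) 1000000007)) #[0]
  let s2 := (a.foldl
      (fun si x => (si.1.push (PySem.Int.mod (pvAGetD si.1 (-1) + x * pvAGetD s1 si.2) 1000000007), si.2 + 1))
      (#[0], (0 : Int))).1
  let s3 := (a.foldl
      (fun si x => (si.1.push (PySem.Int.mod (pvAGetD si.1 (-1) + x * pvAGetD s2 si.2) 1000000007), si.2 + 1))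
      (#[0], (0 : Int))).1
  pvAGetD s3 (-1)

-- ===== PORT B =====
-- B's recursive path-compressing find: 'if parent[v] != v: parent[v] = find(parent[v]); return parent[v]';
-- the fuel argument is for totality only (B's callers pass length+2, enough for any forest path)
def pvFind (p_ : List Int) (v : Int) : Nat → List Int × Int
  | 0 => (p_, v)
  | fuel + 1 =>
    if PySem.List.pyGetD p_ v 0 ≠ v then
      let r := pvFind p_ (PySem.List.pyGetD p_ v 0) fuel
      (PySem.List.pySetD r.1 v r.2, r.2)
    else (p_, v)

def count_red_triplets_alt (n : Int) (edges : List (Int × Int × String)) : Int :=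
  let init : List Int × List Int × List Int :=
    (PySem.List.pyRange 0 n 1, List.replicate n.toNat 0, List.replicate n.toNat 1)
  let st := edges.foldl (fun st e =>
    if e.2.2 = "b" then
      let f1 := pvFind st.1 (e.1 - 1) (st.1.length + 2)
      let f2 := pvFind f1.1 (e.2.1 - 1) (f1.1.length + 2)
      if f1.2 = f2.2 then (f2.1, st.2.1, st.2.2)
      else
        let ab := if PySem.List.pyGetD st.2.1 f1.2 0 < PySem.List.pyGetD st.2.1 f2.2 0
          then (f2.2, f1.2) else (f1.2, f2.2)
        (PySem.List.pySetD f2.1 ab.2 ab.1,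
         PySem.List.pySetD st.2.1 ab.1 (PySem.List.pyGetD st.2.1 ab.1 0 + 1),
         PySem.List.pySetD st.2.2 ab.1 (PySem.List.pyGetD st.2.2 ab.1 0 + PySem.List.pyGetD st.2.2 ab.2 0))
    else st) init
  let t := (PySem.List.pyRange 0 n 1).foldl (fun t i =>
      if PySem.List.pyGetD st.1 i 0 = i then
        let s := PySem.List.pyGetD st.2.2 i 0
        (PySem.Int.mod (t.1 + s) 1000000007,
         PySem.Int.mod (t.2.1 + s * s) 1000000007,
         PySem.Int.mod (t.2.2 + s * s * s) 1000000007)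
      else t) ((0 : Int), (0 : Int), (0 : Int))
  PySem.Int.mod
    (PySem.Int.mod (PySem.Int.mod (t.1 * t.1) 1000000007 * t.1 - 3 * t.1 * t.2.1 + 2 * t.2.2) 1000000007
      * 166666668) 1000000007

-- ===== PRECONDITION & SPEC =====
-- Pre_ excludes exactly the inputs on which Python raises IndexError: a 'b'-coloured edge
-- naming a vertex outside Python's (wraparound-included) index range [-n, n-1] after the -1 shift.
def Pre_count_red_triplets (n : Int) (edges : List (Int × Int × String)) : Prop :=
  ∀ e ∈ edges, e.2.2 = "b" → (1 - n ≤ e.1 ∧ e.1 ≤ n ∧ 1 - n ≤ e.2.1 ∧ e.2.1 ≤ n)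
instance (n : Int) (edges : List (Int × Int × String)) : Decidable (Pre_count_red_triplets n edges) := by
  unfold Pre_count_red_triplets; infer_instance

def pvWitness_count_red_triplets : Int × (List (Int × Int × String)) :=
  (4, [(1, 2, "b"), (2, 3, "r"), (3, 4, "b")])

def Spec_count_red_triplets (n : Int) (edges : List (Int × Int × String)) (out : Int) : Prop := out = count_red_triplets_alt n edges
instance (n : Int) (edges : List (Int × Int × String)) (out : Int) : Decidable (Spec_count_red_triplets n edges out) := by unfold Spec_count_red_triplets; infer_instance

-- ===== CLAIM (what is proved, stated in full; the proofs are below) =====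
def Claim_equal_count_red_triplets : Prop := ∀ (n : Int) (edges : List (Int × Int × String)), Dom_count_red_triplets n edges → Pre_count_red_triplets n edges → Spec_count_red_triplets n edges (count_red_triplets n edges)

-- ===== LEMMAS AND PROOFS =====

-- ---- part 1: B's recursive find produces exactly A's chase-then-compress state ----

theorem pv_setD_comm (q : List Int) (a b r : Int) :
    PySem.List.pySetD (PySem.List.pySetD q a r) b r
      = PySem.List.pySetD (PySem.List.pySetD q b r) a r := by
  have hdef : ∀ (l : List Int) (i v : Int),
      PySem.List.pySetD l i v
        = (Option.map (fun k => l.set k v) (PySem.List.pyIdx? l.length i)).getD l := by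
    intro l i v; rfl
  have hLa : (PySem.List.pySetD q a r).length = q.length := PySem.List.length_pySetD q a r
  have hLb : (PySem.List.pySetD q b r).length = q.length := PySem.List.length_pySetD q b r
  rw [hdef (PySem.List.pySetD q a r) b r, hLa, hdef (PySem.List.pySetD q b r) a r, hLb,
    hdef q a r, hdef q b r]
  cases ha : PySem.List.pyIdx? q.length a <;> cases hb : PySem.List.pyIdx? q.length b <;>
    simp only [Option.map_none, Option.map_some, Option.getD_none, Option.getD_some]
  rename_i ka kb
  by_cases hk : ka = kb
  · subst hk; rfl
  · exact List.set_comm r r hk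

theorem pv_setD_foldl (r : Int) :
    ∀ (st : List Int) (q : List Int) (v : Int),
    st.foldl (fun q u => PySem.List.pySetD q u r) (PySem.List.pySetD q v r)
      = PySem.List.pySetD (st.foldl (fun q u => PySem.List.pySetD q u r) q) v r
  | [], q, v => rfl
  | u :: st, q, v => by
    rw [List.foldl_cons, List.foldl_cons, pv_setD_comm, pv_setD_foldl r st]

theorem pv_chase_acc :
    ∀ (fuel : Nat) (p : List Int) (v : Int) (s : List Int),
    pvChase p v s fuel = (s ++ (pvChase p v [] fuel).1, (pvChase p v [] fuel).2)
  | 0, p, v, s => by simp [pvChase]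
  | fuel + 1, p, v, s => by
    by_cases h : PySem.List.pyGetD p v 0 ≠ v
    · simp only [pvChase, if_pos h]
      rw [pv_chase_acc fuel p _ (s ++ [v]), pv_chase_acc fuel p _ ([] ++ [v])]
      simp
    · simp [pvChase, h]

theorem pv_find_eq :
    ∀ (fuel : Nat) (p : List Int) (v : Int),
    pvFind p v fuel
      = ((pvChase p v [] fuel).1.foldl (fun q u => PySem.List.pySetD q u (pvChase p v [] fuel).2) p,
         (pvChase p v [] fuel).2)
  | 0, p, v => rfl
  | fuel + 1, p, v => by
    by_cases h : PySem.List.pyGetD p v 0 ≠ v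
    · simp only [pvFind, pvChase, if_pos h]
      rw [pv_chase_acc fuel p _ ([] ++ [v])]
      simp only [List.nil_append, List.singleton_append, List.foldl_cons]
      rw [pv_find_eq fuel p (PySem.List.pyGetD p v 0)]
      rw [pv_setD_foldl]
    · simp [pvFind, pvChase, h]

theorem pv_find_get (p : List Int) (v : Int) :
    pvFind p v (p.length + 2) = pvGet p v := by
  rw [pv_find_eq]; rfl

-- B's edge-loop step is A's 'if col == b: union' step
theorem pv_step_eq :
    (fun (st : List Int × List Int × List Int) (e : Int × Int × String) =>
      if e.2.2 = "b" then
        let f1 := pvFind st.1 (e.1 - 1) (st.1.length + 2)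
        let f2 := pvFind f1.1 (e.2.1 - 1) (f1.1.length + 2)
        if f1.2 = f2.2 then (f2.1, st.2.1, st.2.2)
        else
          let ab := if PySem.List.pyGetD st.2.1 f1.2 0 < PySem.List.pyGetD st.2.1 f2.2 0
            then (f2.2, f1.2) else (f1.2, f2.2)
          (PySem.List.pySetD f2.1 ab.2 ab.1,
           PySem.List.pySetD st.2.1 ab.1 (PySem.List.pyGetD st.2.1 ab.1 0 + 1),
           PySem.List.pySetD st.2.2 ab.1 (PySem.List.pyGetD st.2.2 ab.1 0 + PySem.List.pyGetD st.2.2 ab.2 0))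
      else st)
    = (fun st e => if e.2.2 = "b" then pvUnion st (e.1 - 1) (e.2.1 - 1) else st) := by
  funext st e
  by_cases h : e.2.2 = "b"
  · simp only [if_pos h, pvUnion, pv_find_get]
  · simp [h]

-- the two edge-loop folds as standalone states (proof-side helpers)
def pvAState (n : Int) (edges : List (Int × Int × String)) : List Int × List Int × List Int :=
  edges.foldl (fun st e => if e.2.2 = "b" then pvUnion st (e.1 - 1) (e.2.1 - 1) else st)
    (PySem.List.pyRange 0 n 1, List.replicate n.toNat 0, List.replicate n.toNat 1)

def pvBState (n : Int) (edges : List (Int × Int × String)) : List Int × List Int × List Int :=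
  edges.foldl (fun st e =>
    if e.2.2 = "b" then
      let f1 := pvFind st.1 (e.1 - 1) (st.1.length + 2)
      let f2 := pvFind f1.1 (e.2.1 - 1) (f1.1.length + 2)
      if f1.2 = f2.2 then (f2.1, st.2.1, st.2.2)
      else
        let ab := if PySem.List.pyGetD st.2.1 f1.2 0 < PySem.List.pyGetD st.2.1 f2.2 0
          then (f2.2, f1.2) else (f1.2, f2.2)
        (PySem.List.pySetD f2.1 ab.2 ab.1,
         PySem.List.pySetD st.2.1 ab.1 (PySem.List.pyGetD st.2.1 ab.1 0 + 1),
         PySem.List.pySetD st.2.2 ab.1 (PySem.List.pyGetD st.2.2 ab.1 0 + PySem.List.pyGetD st.2.2 ab.2 0))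
    else st)
    (PySem.List.pyRange 0 n 1, List.replicate n.toNat 0, List.replicate n.toNat 1)

theorem pv_state_eq (n : Int) (edges : List (Int × Int × String)) :
    pvBState n edges = pvAState n edges := by
  unfold pvBState pvAState
  rw [pv_step_eq]

-- ---- part 2: the two tails compute the same value from the final union-find state ----

-- (lemmas about A's prefix-sum tail, B's power-sum tail and Newton's identity follow)

-- the tail computations of the two ports, applied to an arbitrary component-size list
def pvS1 (a : List Int) : List Int :=
  a.foldl (fun s x => s ++ [PySem.Int.mod (PySem.List.pyGetD s (-1) 0 + x) 1000000007]) [0]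

def pvS2 (a : List Int) : List Int :=
  (PySem.List.enumerate a 0).foldl
    (fun s ix => s ++ [PySem.Int.mod (PySem.List.pyGetD s (-1) 0 + ix.2 * PySem.List.pyGetD (pvS1 a) ix.1 0) 1000000007]) [0]

def pvS3 (a : List Int) : List Int :=
  (PySem.List.enumerate a 0).foldl
    (fun s ix => s ++ [PySem.Int.mod (PySem.List.pyGetD s (-1) 0 + ix.2 * PySem.List.pyGetD (pvS2 a) ix.1 0) 1000000007]) [0]

def pvSolveA (a : List Int) : Int := PySem.List.pyGetD (pvS3 a) (-1) 0

-- array forms of the three loops (the shape the port of A actually computes)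
def pvA1 (a : List Int) : Array Int :=
  a.foldl (fun s x => s.push (PySem.Int.mod (pvAGetD s (-1) + x) 1000000007)) #[0]

def pvA2 (a : List Int) : Array Int :=
  (a.foldl
    (fun si x => (si.1.push (PySem.Int.mod (pvAGetD si.1 (-1) + x * pvAGetD (pvA1 a) si.2) 1000000007), si.2 + 1))
    (#[0], (0 : Int))).1

def pvA3 (a : List Int) : Array Int :=
  (a.foldl
    (fun si x => (si.1.push (PySem.Int.mod (pvAGetD si.1 (-1) + x * pvAGetD (pvA2 a) si.2) 1000000007), si.2 + 1))
    (#[0], (0 : Int))).1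

def pvArrSolveA (a : List Int) : Int := pvAGetD (pvA3 a) (-1)

-- B's power-sum step over a size list
def pvPstep (t : Int × Int × Int) (s : Int) : Int × Int × Int :=
  (PySem.Int.mod (t.1 + s) 1000000007,
   PySem.Int.mod (t.2.1 + s * s) 1000000007,
   PySem.Int.mod (t.2.2 + s * s * s) 1000000007)

def pvT (a : List Int) : Int × Int × Int := a.foldl pvPstep ((0 : Int), (0 : Int), (0 : Int))

def pvSolveB (a : List Int) : Int :=
  PySem.Int.mod
    (PySem.Int.mod (PySem.Int.mod ((pvT a).1 * (pvT a).1) 1000000007 * (pvT a).1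
        - 3 * (pvT a).1 * (pvT a).2.1 + 2 * (pvT a).2.2) 1000000007
      * 166666668) 1000000007

-- the mod-step functions of A's loops, over zipped lists
def pvStep1 (c x : Int) : Int := PySem.Int.mod (c + x) 1000000007
def pvStep2 (c : Int) (xu : Int × Int) : Int := PySem.Int.mod (c + xu.1 * xu.2) 1000000007

-- elementary-symmetric accumulator over ZMod
def pvG : List Int → ZMod 1000000007 → ZMod 1000000007 → ZMod 1000000007 → ZMod 1000000007
  | [], _, _, w3 => w3
  | x :: t, w1, w2, w3 =>
      pvG t (w1 + (x : ZMod 1000000007)) (w2 + (x : ZMod 1000000007) * w1) (w3 + (x : ZMod 1000000007) * w2)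

-- power-sum accumulator over ZMod
def pvPW : List Int → ZMod 1000000007 × ZMod 1000000007 × ZMod 1000000007 → ZMod 1000000007 × ZMod 1000000007 × ZMod 1000000007
  | [], v => v
  | x :: t, v =>
      pvPW t (v.1 + (x : ZMod 1000000007),
              v.2.1 + (x : ZMod 1000000007) * (x : ZMod 1000000007),
              v.2.2 + (x : ZMod 1000000007) * (x : ZMod 1000000007) * (x : ZMod 1000000007))

theorem pv_agetd (l : List Int) (i : Int) : pvAGetD l.toArray i = PySem.List.pyGetD l i 0 := by
  simp only [pvAGetD, PySem.List.pyGetD, PySem.List.pyGet?, PySem.List.pyIdx?, Array.getD,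
    List.size_toArray]
  split_ifs <;> simp_all

theorem pv_arr_fold {α : Type} (f : Int → α → Int) :
    ∀ (a : List α) (l : List Int),
    a.foldl (fun s x => s.push (f (pvAGetD s (-1)) x)) l.toArray
      = (a.foldl (fun s x => s ++ [f (PySem.List.pyGetD s (-1) 0) x]) l).toArray
  | [], _ => rfl
  | x :: a, l => by
    rw [List.foldl_cons, List.foldl_cons, pv_agetd, List.push_toArray,
      pv_arr_fold f a (l ++ [f (PySem.List.pyGetD l (-1) 0) x])]

theorem pv_a1 (a : List Int) : pvA1 a = (pvS1 a).toArray := by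
  unfold pvA1 pvS1
  have e0 : (#[0] : Array Int) = ([0] : List Int).toArray := rfl
  rw [e0]
  exact pv_arr_fold (fun c (x : Int) => PySem.Int.mod (c + x) 1000000007) a [0]

theorem pv_fold_counter {α σ : Type} (f : σ → Int × α → σ) :
    ∀ (a : List α) (k : Int) (s0 : σ),
    (a.foldl (fun si x => (f si.1 (si.2, x), si.2 + 1)) (s0, k)).1
      = (PySem.List.enumerate a k).foldl f s0
  | [], _, _ => rfl
  | x :: a, k, s0 => by
    rw [List.foldl_cons, PySem.List.enumerate_cons, List.foldl_cons]
    exact pv_fold_counter f a (k + 1) (f s0 (k, x))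

theorem pv_a2_enum (a : List Int) :
    pvA2 a = (PySem.List.enumerate a 0).foldl
      (fun s ix => s.push (PySem.Int.mod (pvAGetD s (-1) + ix.2 * pvAGetD (pvA1 a) ix.1) 1000000007)) #[0] := by
  unfold pvA2
  exact pv_fold_counter (σ := Array Int)
    (fun s ix => s.push (PySem.Int.mod (pvAGetD s (-1) + ix.2 * pvAGetD (pvA1 a) ix.1) 1000000007)) a 0 #[0]

theorem pv_a3_enum (a : List Int) :
    pvA3 a = (PySem.List.enumerate a 0).foldl
      (fun s ix => s.push (PySem.Int.mod (pvAGetD s (-1) + ix.2 * pvAGetD (pvA2 a) ix.1) 1000000007)) #[0] := by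
  unfold pvA3
  exact pv_fold_counter (σ := Array Int)
    (fun s ix => s.push (PySem.Int.mod (pvAGetD s (-1) + ix.2 * pvAGetD (pvA2 a) ix.1) 1000000007)) a 0 #[0]

theorem pv_a2 (a : List Int) : pvA2 a = (pvS2 a).toArray := by
  rw [pv_a2_enum]
  unfold pvS2
  have e0 : (#[0] : Array Int) = ([0] : List Int).toArray := rfl
  have hstep : (fun (s : Array Int) (ix : Int × Int) =>
        s.push (PySem.Int.mod (pvAGetD s (-1) + ix.2 * pvAGetD (pvA1 a) ix.1) 1000000007))
      = (fun (s : Array Int) (ix : Int × Int) =>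
        s.push ((fun c (ix : Int × Int) =>
          PySem.Int.mod (c + ix.2 * PySem.List.pyGetD (pvS1 a) ix.1 0) 1000000007) (pvAGetD s (-1)) ix)) := by
    funext s ix
    rw [pv_a1, pv_agetd (pvS1 a) ix.1]
  rw [hstep, e0]
  exact pv_arr_fold
    (fun c (ix : Int × Int) => PySem.Int.mod (c + ix.2 * PySem.List.pyGetD (pvS1 a) ix.1 0) 1000000007)
    (PySem.List.enumerate a 0) [0]

theorem pv_a3 (a : List Int) : pvA3 a = (pvS3 a).toArray := by
  rw [pv_a3_enum]
  unfold pvS3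
  have e0 : (#[0] : Array Int) = ([0] : List Int).toArray := rfl
  have hstep : (fun (s : Array Int) (ix : Int × Int) =>
        s.push (PySem.Int.mod (pvAGetD s (-1) + ix.2 * pvAGetD (pvA2 a) ix.1) 1000000007))
      = (fun (s : Array Int) (ix : Int × Int) =>
        s.push ((fun c (ix : Int × Int) =>
          PySem.Int.mod (c + ix.2 * PySem.List.pyGetD (pvS2 a) ix.1 0) 1000000007) (pvAGetD s (-1)) ix)) := by
    funext s ix
    rw [pv_a2, pv_agetd (pvS2 a) ix.1]
  rw [hstep, e0]
  exact pv_arr_fold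
    (fun c (ix : Int × Int) => PySem.Int.mod (c + ix.2 * PySem.List.pyGetD (pvS2 a) ix.1 0) 1000000007)
    (PySem.List.enumerate a 0) [0]

theorem pv_arrSolveA (a : List Int) : pvArrSolveA a = pvSolveA a := by
  unfold pvArrSolveA pvSolveA
  rw [pv_a3, pv_agetd]

theorem pv_castmod (t : Int) : ((PySem.Int.mod t 1000000007 : Int) : ZMod 1000000007) = (t : ZMod 1000000007) := by
  rw [PySem.Int.mod_eq_emod_of_pos (by norm_num)]
  have := ZMod.intCast_mod t 1000000007
  norm_num at this
  exact this

theorem pv_getD_neg_one_cons (y : Int) (l : List Int) (h : l ≠ []) :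
    PySem.List.pyGetD (y :: l) (-1) 0 = PySem.List.pyGetD l (-1) 0 := by
  rw [PySem.List.pyGetD_neg_one (xs := y :: l) (d := 0) (h := by simp),
    PySem.List.pyGetD_neg_one (xs := l) (d := 0) (h := h)]
  exact List.getLast_cons h

-- a foldl that appends "f(last, x)" is a scanl
theorem pv_scan_shape {α : Type} (f : Int → α → Int) :
    ∀ (a : List α) (pre : List Int) (b : Int),
    a.foldl (fun s x => s ++ [f (PySem.List.pyGetD s (-1) 0) x]) (pre ++ [b]) = pre ++ List.scanl f b a
  | [], pre, b => by simp
  | x :: a, pre, b => by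
    rw [List.foldl_cons, PySem.List.pyGetD_neg_one_append_singleton]
    have := pv_scan_shape f a (pre ++ [b]) (f b x)
    simpa using this

theorem pv_last_scanl {α : Type} (f : Int → α → Int) :
    ∀ (a : List α) (b : Int), PySem.List.pyGetD (List.scanl f b a) (-1) 0 = a.foldl f b
  | [], b => by
    rw [List.scanl_nil]
    simpa using PySem.List.pyGetD_neg_one_append_singleton (xs := ([] : List Int)) (x := b) (d := 0)
  | x :: a, b => by
    rw [List.scanl_cons, List.foldl_cons,
      pv_getD_neg_one_cons b _ (by simp), pv_last_scanl f a (f b x)]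

-- enumerate + table lookup = zip with the table
theorem pv_foldl_enum (s : List Int) :
    ∀ (a : List Int) (k : Nat) (acc : Int), k + a.length ≤ s.length →
    (PySem.List.enumerate a (k : Int)).foldl
        (fun c ix => PySem.Int.mod (c + ix.2 * PySem.List.pyGetD s ix.1 0) 1000000007) acc
      = (a.zip (s.drop k)).foldl pvStep2 acc
  | [], k, acc, h => by simp [PySem.List.enumerate_nil]
  | x :: a, k, acc, h => by
    have hk : k < s.length := by simp at h; omega
    rw [PySem.List.enumerate_cons, List.foldl_cons,
      List.drop_eq_getElem_cons hk, List.zip_cons_cons, List.foldl_cons]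
    have hget : PySem.List.pyGetD s (k : Int) 0 = s[k] := by
      rw [PySem.List.pyGetD_natCast]
      exact List.getD_eq_getElem s 0 hk
    rw [hget]
    have hcast : ((k : Int) + 1) = ((k + 1 : Nat) : Int) := by push_cast; ring
    rw [hcast, pv_foldl_enum s a (k + 1) _ (by simp at h ⊢; omega)]
    rfl

theorem pv_scanl_enum (s : List Int) :
    ∀ (a : List Int) (k : Nat) (acc : Int), k + a.length ≤ s.length →
    (PySem.List.enumerate a (k : Int)).scanl
        (fun c ix => PySem.Int.mod (c + ix.2 * PySem.List.pyGetD s ix.1 0) 1000000007) acc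
      = (a.zip (s.drop k)).scanl pvStep2 acc
  | [], k, acc, h => by simp [PySem.List.enumerate_nil]
  | x :: a, k, acc, h => by
    have hk : k < s.length := by simp at h; omega
    rw [PySem.List.enumerate_cons, List.scanl_cons,
      List.drop_eq_getElem_cons hk, List.zip_cons_cons, List.scanl_cons]
    have hget : PySem.List.pyGetD s (k : Int) 0 = s[k] := by
      rw [PySem.List.pyGetD_natCast]
      exact List.getD_eq_getElem s 0 hk
    rw [hget]
    have hcast : ((k : Int) + 1) = ((k + 1 : Nat) : Int) := by push_cast; ring
    rw [hcast, pv_scanl_enum s a (k + 1) _ (by simp at h ⊢; omega)]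
    rfl

theorem pv_s1_char (a : List Int) : pvS1 a = List.scanl pvStep1 0 a := by
  unfold pvS1 pvStep1
  simpa using pv_scan_shape (fun c (x : Int) => PySem.Int.mod (c + x) 1000000007) a [] 0

theorem pv_s2_char (a : List Int) :
    pvS2 a = List.scanl pvStep2 0 (a.zip (List.scanl pvStep1 0 a)) := by
  unfold pvS2
  have h1 := pv_scan_shape
    (fun c (ix : Int × Int) => PySem.Int.mod (c + ix.2 * PySem.List.pyGetD (pvS1 a) ix.1 0) 1000000007)
    (PySem.List.enumerate a 0) [] 0
  simp only [List.nil_append] at h1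
  rw [h1]
  have h2 := pv_scanl_enum (pvS1 a) a 0 0
    (by rw [pv_s1_char a]; simp [List.length_scanl])
  simp only [Nat.cast_zero, List.drop_zero] at h2
  rw [h2, pv_s1_char]

theorem pv_solveA_char (a : List Int) :
    pvSolveA a
      = (a.zip (List.scanl pvStep2 0 (a.zip (List.scanl pvStep1 0 a)))).foldl pvStep2 0 := by
  unfold pvSolveA pvS3
  have h1 := pv_scan_shape
    (fun c (ix : Int × Int) => PySem.Int.mod (c + ix.2 * PySem.List.pyGetD (pvS2 a) ix.1 0) 1000000007)
    (PySem.List.enumerate a 0) [] 0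
  simp only [List.nil_append] at h1
  rw [h1, pv_last_scanl]
  have h2 := pv_foldl_enum (pvS2 a) a 0 0
    (by rw [pv_s2_char a]; simp [List.length_scanl])
  simp only [Nat.cast_zero, List.drop_zero] at h2
  rw [h2, pv_s2_char]

theorem pv_castA :
    ∀ (a : List Int) (b1 u2 u3 : Int),
    (((a.zip (List.scanl pvStep2 u2 (a.zip (List.scanl pvStep1 b1 a)))).foldl pvStep2 u3 : Int) : ZMod 1000000007)
      = pvG a (b1 : ZMod 1000000007) (u2 : ZMod 1000000007) (u3 : ZMod 1000000007)
  | [], b1, u2, u3 => by simp [pvG]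
  | x :: t, b1, u2, u3 => by
    rw [List.scanl_cons, List.zip_cons_cons, List.scanl_cons, List.zip_cons_cons, List.foldl_cons,
      pv_castA t (pvStep1 b1 x) (pvStep2 u2 (x, b1)) (pvStep2 u3 (x, u2))]
    have e1 : ((pvStep1 b1 x : Int) : ZMod 1000000007) = (b1 : ZMod 1000000007) + (x : ZMod 1000000007) := by
      unfold pvStep1; rw [pv_castmod]; push_cast; ring
    have e2 : ((pvStep2 u2 (x, b1) : Int) : ZMod 1000000007)
        = (u2 : ZMod 1000000007) + (x : ZMod 1000000007) * (b1 : ZMod 1000000007) := by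
      unfold pvStep2; rw [pv_castmod]; push_cast; ring
    have e3 : ((pvStep2 u3 (x, u2) : Int) : ZMod 1000000007)
        = (u3 : ZMod 1000000007) + (x : ZMod 1000000007) * (u2 : ZMod 1000000007) := by
      unfold pvStep2; rw [pv_castmod]; push_cast; ring
    rw [e1, e2, e3]
    rfl

theorem pv_castPW :
    ∀ (a : List Int) (v1 v2 v3 : Int),
    (((a.foldl pvPstep (v1, v2, v3)).1 : Int) : ZMod 1000000007) = (pvPW a ((v1 : ZMod 1000000007), (v2 : ZMod 1000000007), (v3 : ZMod 1000000007))).1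
    ∧ (((a.foldl pvPstep (v1, v2, v3)).2.1 : Int) : ZMod 1000000007) = (pvPW a ((v1 : ZMod 1000000007), (v2 : ZMod 1000000007), (v3 : ZMod 1000000007))).2.1
    ∧ (((a.foldl pvPstep (v1, v2, v3)).2.2 : Int) : ZMod 1000000007) = (pvPW a ((v1 : ZMod 1000000007), (v2 : ZMod 1000000007), (v3 : ZMod 1000000007))).2.2
  | [], v1, v2, v3 => by simp [pvPW]
  | x :: t, v1, v2, v3 => by
    rw [List.foldl_cons]
    have := pv_castPW t (pvPstep (v1, v2, v3) (x)).1 (pvPstep (v1, v2, v3) x).2.1 (pvPstep (v1, v2, v3) x).2.2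
    simp only [pvPstep] at this ⊢
    rw [pv_castmod, pv_castmod, pv_castmod] at this
    push_cast at this
    convert this using 3

theorem pv_newton :
    ∀ (a : List Int) (w1 w2 w3 v2 v3 : ZMod 1000000007),
    2 * w2 = w1 * w1 - v2 →
    6 * w3 = w1 * w1 * w1 - 3 * w1 * v2 + 2 * v3 →
    6 * pvG a w1 w2 w3
      = (pvPW a (w1, v2, v3)).1 * (pvPW a (w1, v2, v3)).1 * (pvPW a (w1, v2, v3)).1
        - 3 * (pvPW a (w1, v2, v3)).1 * (pvPW a (w1, v2, v3)).2.1
        + 2 * (pvPW a (w1, v2, v3)).2.2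
  | [], w1, w2, w3, v2, v3, _, h3 => by simpa [pvPW] using h3
  | x :: t, w1, w2, w3, v2, v3, h2, h3 => by
    show 6 * pvG t _ _ _ = _
    have hPW : pvPW (x :: t) (w1, v2, v3)
        = pvPW t (w1 + (x : ZMod 1000000007),
                  v2 + (x : ZMod 1000000007) * (x : ZMod 1000000007),
                  v3 + (x : ZMod 1000000007) * (x : ZMod 1000000007) * (x : ZMod 1000000007)) := rfl
    rw [hPW]
    exact pv_newton t (w1 + x) (w2 + x * w1) (w3 + x * w2)
      (v2 + (x : ZMod 1000000007) * x) (v3 + (x : ZMod 1000000007) * x * x)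
      (by linear_combination h2) (by linear_combination h3 + 3 * (x : ZMod 1000000007) * h2)

theorem pv_range_foldl :
    ∀ (l : List (Int × Int)) (u : Int), 0 ≤ u → u < 1000000007 →
    0 ≤ l.foldl pvStep2 u ∧ l.foldl pvStep2 u < 1000000007
  | [], u, h0, h1 => ⟨h0, h1⟩
  | xu :: l, u, _, _ => by
    rw [List.foldl_cons]
    exact pv_range_foldl l (pvStep2 u xu)
      (PySem.Int.mod_nonneg _ (by norm_num)) (PySem.Int.mod_lt _ (by norm_num))

theorem pv_int_eq_of_cast (x y : Int) (hx0 : 0 ≤ x) (hx1 : x < 1000000007)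
    (hy0 : 0 ≤ y) (hy1 : y < 1000000007)
    (h : (x : ZMod 1000000007) = (y : ZMod 1000000007)) : x = y := by
  have h2 := (ZMod.intCast_eq_intCast_iff' x y 1000000007).mp h
  unfold Int.ModEq at h2
  omega

theorem pv_inv6 : ((6 : ZMod 1000000007) * 166666668) = 1 := by decide

-- A's three-loop tail equals B's power-sum + Newton tail, on any size list
theorem pv_solve_eq (a : List Int) : pvSolveA a = pvSolveB a := by
  have hchar := pv_solveA_char a
  have hA : ((pvSolveA a : Int) : ZMod 1000000007) = pvG a 0 0 0 := by
    rw [hchar]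
    simpa using pv_castA a 0 0 0
  have hPW := pv_castPW a 0 0 0
  have hT1 : (((pvT a).1 : Int) : ZMod 1000000007) = (pvPW a (0, 0, 0)).1 := by
    simpa [pvT] using hPW.1
  have hT2 : (((pvT a).2.1 : Int) : ZMod 1000000007) = (pvPW a (0, 0, 0)).2.1 := by
    simpa [pvT] using hPW.2.1
  have hT3 : (((pvT a).2.2 : Int) : ZMod 1000000007) = (pvPW a (0, 0, 0)).2.2 := by
    simpa [pvT] using hPW.2.2
  have hN := pv_newton a 0 0 0 0 0 (by ring) (by ring)
  have hB : ((pvSolveB a : Int) : ZMod 1000000007) = pvG a 0 0 0 := by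
    unfold pvSolveB
    rw [pv_castmod]
    push_cast
    rw [pv_castmod]
    push_cast
    rw [pv_castmod]
    push_cast
    rw [hT1, hT2, hT3]
    linear_combination (-(166666668 : ZMod 1000000007)) * hN + pvG a 0 0 0 * pv_inv6
  have hAr : 0 ≤ pvSolveA a ∧ pvSolveA a < 1000000007 := by
    rw [hchar]
    exact pv_range_foldl _ 0 (by norm_num) (by norm_num)
  have hBr : 0 ≤ pvSolveB a ∧ pvSolveB a < 1000000007 := by
    unfold pvSolveB
    exact ⟨PySem.Int.mod_nonneg _ (by norm_num), PySem.Int.mod_lt _ (by norm_num)⟩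
  exact pv_int_eq_of_cast _ _ hAr.1 hAr.2 hBr.1 hBr.2 (hA.trans hB.symm)

-- ---- part 3: B's index pass computes pvT of A's component-size list ----

-- lengths of the union-find state are invariant through the edge loop
theorem pv_foldl_setD_len (r : Int) :
    ∀ (l : List Int) (q : List Int),
    (l.foldl (fun q u => PySem.List.pySetD q u r) q).length = q.length
  | [], q => rfl
  | u :: l, q => by
    rw [List.foldl_cons, pv_foldl_setD_len r l, PySem.List.length_pySetD]

theorem pv_get_len (p : List Int) (v : Int) : (pvGet p v).1.length = p.length := by
  unfold pvGet
  exact pv_foldl_setD_len _ _ p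

theorem pv_union_len (st : List Int × List Int × List Int) (w1 w2 : Int) :
    (pvUnion st w1 w2).1.length = st.1.length ∧ (pvUnion st w1 w2).2.2.length = st.2.2.length := by
  by_cases h : (pvGet st.1 w1).2 = (pvGet (pvGet st.1 w1).1 w2).2 <;>
    simp [pvUnion, h, PySem.List.length_pySetD, pv_get_len, pv_get_len (pvGet st.1 w1).1]

theorem pv_fold_len :
    ∀ (edges : List (Int × Int × String)) (st : List Int × List Int × List Int),
    (edges.foldl (fun st e => if e.2.2 = "b" then pvUnion st (e.1 - 1) (e.2.1 - 1) else st) st).1.length = st.1.length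
    ∧ (edges.foldl (fun st e => if e.2.2 = "b" then pvUnion st (e.1 - 1) (e.2.1 - 1) else st) st).2.2.length = st.2.2.length
  | [], st => ⟨rfl, rfl⟩
  | e :: es, st => by
    have h1 := pv_fold_len es (if e.2.2 = "b" then pvUnion st (e.1 - 1) (e.2.1 - 1) else st)
    have h2 := pv_union_len st (e.1 - 1) (e.2.1 - 1)
    refine ⟨?_, ?_⟩
    · rw [List.foldl_cons, h1.1]; split_ifs; exacts [h2.1, rfl]
    · rw [List.foldl_cons, h1.2]; split_ifs; exacts [h2.2, rfl]

-- a conditional-append array fold is a list fold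
theorem pv_arr_fold_if {α : Type} (φ : α → Bool) (g : α → Int) :
    ∀ (a : List α) (l : List Int),
    a.foldl (fun arr x => if φ x then arr.push (g x) else arr) l.toArray
      = (a.foldl (fun acc x => if φ x then acc ++ [g x] else acc) l).toArray
  | [], _ => rfl
  | x :: a, l => by
    rw [List.foldl_cons, List.foldl_cons]
    by_cases h : φ x
    · rw [if_pos h, if_pos h, List.push_toArray, pv_arr_fold_if φ g a]
    · rw [if_neg h, if_neg h, pv_arr_fold_if φ g a]

-- A's a-list is a filter-map over the enumerated (parent, size) table
theorem pv_a_char (P S : List Int) :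
    ((P.zip S).foldl
        (fun (ai : Array Int × Int) pv => (if pv.1 == ai.2 then ai.1.push pv.2 else ai.1, ai.2 + 1))
        (#[], (0 : Int))).1.toList
      = ((PySem.List.enumerate (P.zip S) 0).filter (fun e => e.2.1 == e.1)).map (fun e => e.2.2) := by
  have h1 := pv_fold_counter (α := Int × Int) (σ := Array Int)
    (fun arr kpv => if kpv.2.1 == kpv.1 then arr.push kpv.2.2 else arr) (P.zip S) 0 #[]
  have h0 : ((P.zip S).foldl
      (fun (ai : Array Int × Int) pv => (if pv.1 == ai.2 then ai.1.push pv.2 else ai.1, ai.2 + 1))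
      (#[], (0 : Int))).1
      = ((P.zip S).foldl
      (fun (si : Array Int × Int) x =>
        ((fun arr (kpv : Int × Int × Int) => if kpv.2.1 == kpv.1 then arr.push kpv.2.2 else arr) si.1 (si.2, x), si.2 + 1))
      (#[], (0 : Int))).1 := rfl
  rw [h0, h1]
  have e0 : (#[] : Array Int) = ([] : List Int).toArray := rfl
  rw [e0, pv_arr_fold_if (fun e : Int × Int × Int => e.2.1 == e.1) (fun e => e.2.2)]
  rw [PySem.List.foldl_append_if]
  simp

-- fold with a boolean filter = fold over the filtered, mapped list
theorem pv_fold_filter {α T : Type} (φ : α → Bool) (ψ : α → Int) (h : T → Int → T) :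
    ∀ (E : List α) (t0 : T),
    E.foldl (fun t e => if φ e then h t (ψ e) else t) t0
      = ((E.filter φ).map ψ).foldl h t0
  | [], _ => rfl
  | x :: E, t0 => by
    by_cases hx : φ x
    · simp only [List.foldl_cons, if_pos hx, List.filter_cons_of_pos hx, List.map_cons, List.foldl_cons]
      exact pv_fold_filter φ ψ h E (h t0 (ψ x))
    · simp only [List.foldl_cons, if_neg hx, List.filter_cons_of_neg hx]
      exact pv_fold_filter φ ψ h E t0
  
-- an index loop with table lookups is a loop over the enumerated zip of the tables
theorem pv_idx {T : Type} (P S : List Int) (g : T → Int → Int → Int → T) :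
    ∀ (c k : Nat) (acc : T), k + c = P.length → P.length = S.length →
    (List.range' k c).foldl (fun t (j : Nat) => g t (j : Int) (P.getD j 0) (S.getD j 0)) acc
      = (PySem.List.enumerate ((P.drop k).zip (S.drop k)) (k : Int)).foldl
          (fun t e => g t e.1 e.2.1 e.2.2) acc
  | 0, k, acc, hc, hl => by
    have : P.drop k = [] := List.drop_eq_nil_of_le (by omega)
    simp [this, PySem.List.enumerate_nil]
  | c + 1, k, acc, hc, hl => by
    have hkP : k < P.length := by omega
    have hkS : k < S.length := by omega
    rw [List.range'_succ, List.foldl_cons,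
      List.drop_eq_getElem_cons hkP, List.drop_eq_getElem_cons hkS,
      List.zip_cons_cons, PySem.List.enumerate_cons, List.foldl_cons]
    have hP : P.getD k 0 = P[k] := List.getD_eq_getElem P 0 hkP
    have hS : S.getD k 0 = S[k] := List.getD_eq_getElem S 0 hkS
    rw [hP, hS]
    have hcast : ((k : Int) + 1) = ((k + 1 : Nat) : Int) := by push_cast; ring
    rw [hcast, pv_idx P S g c (k + 1) _ (by omega) hl]

-- B's power-sum index pass = pvT of A's a-list
theorem pv_tail_eq (n : Int) (P S : List Int)
    (hP : P.length = n.toNat) (hS : S.length = n.toNat) :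
    (PySem.List.pyRange 0 n 1).foldl (fun t i =>
        if PySem.List.pyGetD P i 0 = i then
          let s := PySem.List.pyGetD S i 0
          (PySem.Int.mod (t.1 + s) 1000000007,
           PySem.Int.mod (t.2.1 + s * s) 1000000007,
           PySem.Int.mod (t.2.2 + s * s * s) 1000000007)
        else t) ((0 : Int), (0 : Int), (0 : Int))
      = pvT (((P.zip S).foldl
          (fun (ai : Array Int × Int) pv => (if pv.1 == ai.2 then ai.1.push pv.2 else ai.1, ai.2 + 1))
          (#[], (0 : Int))).1.toList) := by
  rw [pv_a_char]
  have hrange : PySem.List.pyRange 0 n 1 = (List.range n.toNat).map (fun k : Nat => (k : Int)) :=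
    PySem.List.pyRange_zero n
  rw [hrange, List.foldl_map, List.range_eq_range']
  have hg := pv_idx P S
      (fun t i x y => if x = i then pvPstep t y else t) n.toNat 0
      ((0 : Int), (0 : Int), (0 : Int)) (by omega) (by omega)
  simp only [List.drop_zero, Nat.cast_zero] at hg
  have hsteps : (fun (t : Int × Int × Int) (j : Nat) =>
      if PySem.List.pyGetD P (j : Int) 0 = (j : Int) then
        let s := PySem.List.pyGetD S (j : Int) 0
        (PySem.Int.mod (t.1 + s) 1000000007,
         PySem.Int.mod (t.2.1 + s * s) 1000000007,
         PySem.Int.mod (t.2.2 + s * s * s) 1000000007)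
      else t)
      = (fun (t : Int × Int × Int) (j : Nat) =>
        (fun t (i x y : Int) => if x = i then pvPstep t y else t) t (j : Int) (P.getD j 0) (S.getD j 0)) := by
    funext t j
    simp [PySem.List.pyGetD_natCast, pvPstep]
  rw [hsteps, hg]
  have hfilt : (fun (t : Int × Int × Int) (e : Int × Int × Int) =>
      (fun t (i x y : Int) => if x = i then pvPstep t y else t) t e.1 e.2.1 e.2.2)
      = (fun (t : Int × Int × Int) (e : Int × Int × Int) =>
        if (fun e : Int × Int × Int => e.2.1 == e.1) e then pvPstep t ((fun e : Int × Int × Int => e.2.2) e) else t) := by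
    funext t e
    by_cases h : e.2.1 = e.1 <;> simp [h]
  rw [hfilt, pv_fold_filter]
  rfl

-- ===== VERDICT (by name: the statement is the Claim_ definition above) =====
theorem count_red_triplets_spec : Claim_equal_count_red_triplets := by
  intro n edges _ _
  unfold Spec_count_red_triplets
  show pvArrSolveA (pvCompSizes n edges)
      = (fun t : Int × Int × Int =>
          PySem.Int.mod
            (PySem.Int.mod (PySem.Int.mod (t.1 * t.1) 1000000007 * t.1 - 3 * t.1 * t.2.1 + 2 * t.2.2) 1000000007
              * 166666668) 1000000007)
        ((PySem.List.pyRange 0 n 1).foldl (fun t i =>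
          if PySem.List.pyGetD (pvBState n edges).1 i 0 = i then
            let s := PySem.List.pyGetD (pvBState n edges).2.2 i 0
            (PySem.Int.mod (t.1 + s) 1000000007,
             PySem.Int.mod (t.2.1 + s * s) 1000000007,
             PySem.Int.mod (t.2.2 + s * s * s) 1000000007)
          else t) ((0 : Int), (0 : Int), (0 : Int)))
  rw [pv_state_eq]
  have hlen := pv_fold_len edges
    (PySem.List.pyRange 0 n 1, List.replicate n.toNat 0, List.replicate n.toNat 1)
  have hP : (pvAState n edges).1.length = n.toNat := by
    unfold pvAState; rw [hlen.1]; simp [PySem.List.length_pyRange_one]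
  have hS : (pvAState n edges).2.2.length = n.toNat := by
    unfold pvAState; rw [hlen.2]; simp
  rw [pv_tail_eq n (pvAState n edges).1 (pvAState n edges).2.2 hP hS]
  show pvArrSolveA (pvCompSizes n edges) = pvSolveB (pvCompSizes n edges)
  rw [pv_arrSolveA]
  exact pv_solve_eq _
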